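-- pv_equiv track=rewrite | github.com/ThomasCZhang/CMU-02710-Genomics-Spring2023 | HW1/code/BWT.py | bwt_encode
-- ===== SOURCE A (Python) =====
-- def bwt_encode(s: str):
--     """Burrows-Wheeler Transform
--     Args: s, string, which must not contain '{' or '}'
--     Returns: BWT(s), which contains '{' and '}'
--     """
--     s = "".join(["{", s, "}"])
--     temp_dict = {} # Using this dict to aid with sorting.
--     for i in range(len(s)-1, 0, -1): # We're going to index from the end. This will act as the sorting part too.
--         key = s[i]
--         val = s[i-1]
--         if key in temp_dict:
--             temp_dict[key] = "".join([temp_dict[key], val])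
--         else:
--             temp_dict[key] = val
--     key = s[0]
--     val = "}"
--     if key in temp_dict:
--         temp_dict[key] = "".join([temp_dict[key], val])
--     else:
--         temp_dict[key] = val
--
--     # first_char = temp_dict["}"]
--     # del temp_dict["}"]
--     sorted_keys = sorted(list(temp_dict.keys()))
--     bwt_s = "".join((temp_dict[key] for key in sorted_keys))
--     # bwt_s = "".join((first_char, bwt_s))
--     return bwt_s
-- ===== SOURCE B (Python) =====
-- def bwt_encode(s: str):
--     """Burrows-Wheeler Transform via one stable sort of (char, predecessor) pairs."""
--     t = "".join(["{", s, "}"])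
--     n = len(t)
--     pairs = [(t[i], t[(i - 1) % n]) for i in range(n - 1, -1, -1)]
--     pairs.sort(key=lambda p: p[0])
--     return "".join(p[1] for p in pairs)
-- ===== Notes on version B (the rewrite author's own statement) =====
-- stated objective: faster
-- what changed: Replaces the dict-of-buckets (append each predecessor to a per-character string, then sort the key set and concatenate the buckets) by building the full (char, predecessor) pair list in one comprehension with a uniform (i-1) % n wraparound and doing a single stable sort on it.
import Mathlib
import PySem

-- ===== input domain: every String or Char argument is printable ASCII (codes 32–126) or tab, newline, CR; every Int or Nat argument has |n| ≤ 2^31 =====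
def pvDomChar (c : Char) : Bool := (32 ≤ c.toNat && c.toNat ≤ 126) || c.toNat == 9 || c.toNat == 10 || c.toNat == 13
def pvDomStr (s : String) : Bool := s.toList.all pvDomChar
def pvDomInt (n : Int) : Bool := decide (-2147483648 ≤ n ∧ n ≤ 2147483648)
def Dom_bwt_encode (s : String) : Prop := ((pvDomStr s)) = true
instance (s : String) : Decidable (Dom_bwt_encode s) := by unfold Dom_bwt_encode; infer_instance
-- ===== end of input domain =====

-- B replaces A's per-character dict of predecessor buckets (plus sorted key set) by one
-- stable sort of the full (char, predecessor) pair list built with a uniform (i-1) % n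
-- wraparound; objective: faster (one library sort in place of per-bucket string appends).

-- ===== PORT A =====
-- the 'if key in temp_dict: … else: …' update of A's loop body
def bwtStepA (d : PySem.Dict Char (List Char)) (key : Char) (val : Char) :
    PySem.Dict Char (List Char) :=
  if d.contains key then d.insert key (d.getD key [] ++ [val]) else d.insert key [val]

def bwt_encode (s : String) : String :=
  -- s = "".join(["{", s, "}"])
  let cs : List Char := ['{'] ++ s.toList ++ ['}']
  let d : PySem.Dict Char (List Char) :=
    (PySem.List.pyRange (PySem.List.len cs - 1) 0 (-1)).foldl
      (fun d i => bwtStepA d (PySem.List.pyGetD cs i ' ') (PySem.List.pyGetD cs (i - 1) ' '))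
      PySem.Dict.empty
  -- key = s[0]; val = "}"; the same if/else once more
  let d : PySem.Dict Char (List Char) := bwtStepA d (PySem.List.pyGetD cs 0 ' ') '}'
  let sortedKeys : List Char := PySem.List.sorted d.keys (fun k => k) false
  String.mk ((sortedKeys.map (fun k => d.getD k [])).flatten)

-- ===== PORT B =====
def bwt_encode_alt (s : String) : String :=
  let t : List Char := ['{'] ++ s.toList ++ ['}']
  let n : Int := PySem.List.len t
  let pairs : List (Char × Char) :=
    (PySem.List.pyRange (n - 1) (-1) (-1)).map
      (fun i => (PySem.List.pyGetD t i ' ', PySem.List.pyGetD t (PySem.Int.mod (i - 1) n) ' '))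
  let sortedPairs := PySem.List.sorted pairs (fun p => p.1) false
  String.mk (sortedPairs.map (fun p => p.2))

-- ===== PRECONDITION & SPEC =====
def Spec_bwt_encode (s : String) (out : String) : Prop := out = bwt_encode_alt s
instance (s : String) (out : String) : Decidable (Spec_bwt_encode s out) := by unfold Spec_bwt_encode; infer_instance

-- ===== CLAIM (what is proved, stated in full; the proofs are below) =====
def Claim_equal_bwt_encode : Prop := ∀ (s : String), Dom_bwt_encode s → Spec_bwt_encode s (bwt_encode s)

-- ===== LEMMAS AND PROOFS =====

-- the 'if key in temp_dict: … else: …' update of A's loop body is exactly a `modify`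
theorem bwtStepA_eq_modify (d : PySem.Dict Char (List Char)) (key val : Char) :
    bwtStepA d key val = d.modify key [] (fun old => old ++ [val]) := by
  unfold bwtStepA PySem.Dict.modify
  by_cases h : d.contains key
  · simp [h]
  · simp only [Bool.not_eq_true] at h
    simp [h, PySem.Dict.getD_of_not_contains d [] h]

-- insertBy lands after everything not 'before' x and in front of everything 'before' x
theorem insertBy_middle {alpha : Type} (bef : alpha → alpha → Bool) (x : alpha) (l1 l2 : List alpha)
    (h1 : ∀ y ∈ l1, bef x y = false) (h2 : ∀ y ∈ l2, bef x y = true) :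
    PySem.List.insertBy bef x (l1 ++ l2) = l1 ++ x :: l2 := by
  induction l1 with
  | nil =>
    cases l2 with
    | nil => rfl
    | cons z zs => simp [PySem.List.insertBy, h2 z (by simp)]
  | cons y ys ih =>
    have hy : bef x y = false := h1 y (by simp)
    simp only [List.cons_append, PySem.List.insertBy, hy]
    simp only [Bool.false_eq_true, if_false, List.cons.injEq, true_and]
    exact ih (fun y hy => h1 y (by simp [hy]))

-- appending one element to the underlying list of a Python set
theorem ofList_append_singleton (xs : List Char) (a : Char) :
    PySem.Set.ofList (xs ++ [a]) =
      if a ∈ xs then PySem.Set.ofList xs else PySem.Set.ofList xs ++ [a] := by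
  rw [PySem.Set.ofList_eq_foldl, List.foldl_append, ← PySem.Set.ofList_eq_foldl]
  simp only [List.foldl_cons, List.foldl_nil]
  unfold PySem.Set.add
  by_cases h : a ∈ xs
  · have hc : (PySem.Set.ofList xs).contains a = true := by
      unfold PySem.Set.contains
      simpa [List.contains_iff_mem, PySem.Set.mem_ofList]
    simp [h]
  · have hc : (PySem.Set.ofList xs).contains a = false := by
      unfold PySem.Set.contains
      simpa [List.contains_iff_mem, PySem.Set.mem_ofList]
    simp [h]

-- strictly increasing list split at a member
theorem pairwise_lt_split {a : Char} {l : List Char}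
    (hp : l.Pairwise (· < ·)) (hm : a ∈ l) :
    ∃ A C, l = A ++ a :: C ∧ (∀ b ∈ A, b < a) ∧ (∀ b ∈ C, a < b) := by
  obtain ⟨A, C, rfl⟩ := List.append_of_mem hm
  refine ⟨A, C, rfl, ?_, ?_⟩
  · intro b hb
    exact (List.pairwise_append.1 hp).2.2 b hb a (by simp)
  · intro b hb
    exact (List.pairwise_cons.1 (List.pairwise_append.1 hp).2.1).1 b hb

-- bucket of a key absent from a pair list is empty
theorem filter_eq_nil_of_not_mem {ps : List (Char × Char)} {c : Char}
    (h : c ∉ ps.map Prod.fst) : ps.filter (fun p => p.1 == c) = [] := by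
  apply List.filter_eq_nil_iff.2
  intro p hp hc
  exact h (List.mem_map.2 ⟨p, hp, by simpa using hc⟩)

-- adding a pair does not touch the buckets of other keys
theorem flatMap_filter_append_of_ne (D : List Char) (qs : List (Char × Char)) (x : Char × Char)
    (h : ∀ c ∈ D, x.1 ≠ c) :
    D.flatMap (fun c => (qs ++ [x]).filter (fun p => p.1 == c)) =
      D.flatMap (fun c => qs.filter (fun p => p.1 == c)) := by
  apply List.flatMap_congr
  intro c hc
  rw [List.filter_append]
  simp [h c hc]

-- every element of a bucket concatenation carries a key from the key list
theorem fst_mem_of_mem_flatMap {D : List Char} {qs : List (Char × Char)} {y : Char × Char}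
    (h : y ∈ D.flatMap (fun c => qs.filter (fun p => p.1 == c))) : y.1 ∈ D := by
  obtain ⟨c, hc, hyc⟩ := List.mem_flatMap.1 h
  have : y.1 = c := by simpa using (List.mem_filter.1 hyc).2
  exact this ▸ hc

-- THE CORE: a stable sort by first component is the bucket concatenation over the
-- sorted distinct keys
theorem sorted_fst_eq_flatMap (ps : List (Char × Char)) :
    PySem.List.sorted ps (fun p => p.1) false =
      (PySem.List.sorted (PySem.Set.ofList (ps.map Prod.fst)) (fun k => k) false).flatMap
        (fun c => ps.filter (fun p => p.1 == c)) := by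
  induction ps using List.reverseRecOn with
  | nil => simp [PySem.List.sorted, PySem.Set.ofList]
  | append_singleton qs x ih =>
    have hsort := PySem.List.sorted_eq_foldl_insertBy (qs ++ [x]) (fun p : Char × Char => p.1)
    rw [List.foldl_append] at hsort
    rw [hsort]
    simp only [List.foldl_cons, List.foldl_nil]
    rw [← PySem.List.sorted_eq_foldl_insertBy qs (fun p : Char × Char => p.1), ih]
    have hKlt : (PySem.List.sorted (PySem.Set.ofList (qs.map Prod.fst)) (fun k => k) false).Pairwise (· < ·) :=
      PySem.List.sorted_ofList_pairwise_lt _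
    have hKmem : ∀ c, c ∈ PySem.List.sorted (PySem.Set.ofList (qs.map Prod.fst)) (fun k => k) false
        ↔ c ∈ qs.map Prod.fst := by
      intro c
      rw [PySem.List.mem_sorted, PySem.Set.mem_ofList]
    set K : List Char := PySem.List.sorted (PySem.Set.ofList (qs.map Prod.fst)) (fun k => k) false with hK
    by_cases hmem : x.1 ∈ K
    · -- key already present: the sorted key set is unchanged, x goes to the end of its bucket
      obtain ⟨A, C, hKsplit, hA, hC⟩ := pairwise_lt_split hKlt hmem
      have hKeq : PySem.List.sorted (PySem.Set.ofList ((qs ++ [x]).map Prod.fst)) (fun k => k) false = K := by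
        rw [hK]
        congr 1
        rw [List.map_append]
        simp only [List.map_cons, List.map_nil]
        rw [ofList_append_singleton]
        rw [if_pos ((hKmem x.1).1 hmem)]
      rw [hKeq, hKsplit]
      simp only [List.flatMap_append, List.flatMap_cons]
      rw [← List.append_assoc]
      rw [insertBy_middle (fun a b => decide (a.1 < b.1)) x
            (A.flatMap (fun c => qs.filter (fun p => p.1 == c)) ++ qs.filter (fun p => p.1 == x.1))
            (C.flatMap (fun c => qs.filter (fun p => p.1 == c)))
            ?_ ?_]
      · rw [flatMap_filter_append_of_ne A qs x
              (fun c hc h => absurd (h ▸ hA c hc) (lt_irrefl _))]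
        rw [flatMap_filter_append_of_ne C qs x
              (fun c hc h => absurd (h ▸ hC c hc) (lt_irrefl _))]
        rw [List.filter_append]
        simp
      · intro y hy
        rcases List.mem_append.1 hy with hy | hy
        · have hlt : y.1 < x.1 := hA _ (fst_mem_of_mem_flatMap hy)
          simp only [decide_eq_false_iff_not]
          exact fun h => absurd (lt_trans h hlt) (lt_irrefl _)
        · have : y.1 = x.1 := by simpa using (List.mem_filter.1 hy).2
          simp [this]
      · intro y hy
        have hgt : x.1 < y.1 := hC _ (fst_mem_of_mem_flatMap hy)
        simpa using hgt
    · -- new key: it is inserted into the sorted key set; its bucket is the singleton [x]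
      have hnotq : x.1 ∉ qs.map Prod.fst := fun h => hmem ((hKmem x.1).2 h)
      have hAlt : ∀ b ∈ K.takeWhile (fun c => decide (c < x.1)), b < x.1 := by
        intro b hb
        simpa using List.mem_takeWhile_imp hb
      have hTD : K.takeWhile (fun c => decide (c < x.1)) ++ K.dropWhile (fun c => decide (c < x.1)) = K :=
        List.takeWhile_append_dropWhile
      have hCgt : ∀ b ∈ K.dropWhile (fun c => decide (c < x.1)), x.1 < b := by
        intro b hb
        have hbK : b ∈ K := by
          rw [← hTD]
          exact List.mem_append.2 (Or.inr hb)
        have hbne : x.1 ≠ b := fun h => hmem (h ▸ hbK)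
        have hpC : (K.dropWhile (fun c => decide (c < x.1))).Pairwise (· < ·) := by
          have hp := hKlt
          rw [← hTD] at hp
          exact (List.pairwise_append.1 hp).2.1
        cases hCc : K.dropWhile (fun c => decide (c < x.1)) with
        | nil => rw [hCc] at hb; cases hb
        | cons h0 t =>
          have hhead : ¬ (h0 < x.1) := by
            have hh := List.head?_dropWhile_not (fun c => decide (c < x.1)) K
            rw [hCc] at hh
            simpa using hh
          rw [hCc] at hb hpC
          rcases List.mem_cons.1 hb with rfl | hb'
          · exact lt_of_le_of_ne (le_of_not_gt hhead) hbne
          · exact lt_of_le_of_lt (le_of_not_gt hhead) ((List.pairwise_cons.1 hpC).1 b hb')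
      have hKeq : PySem.List.sorted (PySem.Set.ofList ((qs ++ [x]).map Prod.fst)) (fun k => k) false
          = K.takeWhile (fun c => decide (c < x.1)) ++ x.1 :: K.dropWhile (fun c => decide (c < x.1)) := by
        apply PySem.List.sorted_eq_of_perm_of_pairwise_lt
        · have hset : PySem.Set.ofList ((qs ++ [x]).map Prod.fst)
              = PySem.Set.ofList (qs.map Prod.fst) ++ [x.1] := by
            rw [List.map_append]
            simp only [List.map_cons, List.map_nil]
            rw [ofList_append_singleton, if_neg hnotq]
          rw [hset]
          have p1 : (K.takeWhile (fun c => decide (c < x.1)) ++ x.1 :: K.dropWhile (fun c => decide (c < x.1))).Perm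
              (x.1 :: K) := by
            have := List.perm_middle (a := x.1)
              (l₁ := K.takeWhile (fun c => decide (c < x.1))) (l₂ := K.dropWhile (fun c => decide (c < x.1)))
            rwa [List.takeWhile_append_dropWhile] at this
          have p2 : K.Perm (PySem.Set.ofList (qs.map Prod.fst)) := hK ▸ PySem.List.sorted_perm _ _ _
          exact p1.trans ((p2.cons x.1).trans (List.perm_append_singleton x.1 _).symm)
        · rw [List.pairwise_append]
          refine ⟨?_, List.pairwise_cons.2 ⟨hCgt, ?_⟩, ?_⟩
          · have hp := hKlt
            rw [← hTD] at hp
            exact (List.pairwise_append.1 hp).1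
          · have hp := hKlt
            rw [← hTD] at hp
            exact (List.pairwise_append.1 hp).2.1
          · intro a ha b hb
            rcases List.mem_cons.1 hb with rfl | hb'
            · exact hAlt a ha
            · exact lt_trans (hAlt a ha) (hCgt b hb')
      rw [hKeq]
      conv_lhs => rw [← hTD]
      simp only [List.flatMap_append, List.flatMap_cons]
      rw [insertBy_middle (fun a b => decide (a.1 < b.1)) x
            ((K.takeWhile (fun c => decide (c < x.1))).flatMap (fun c => qs.filter (fun p => p.1 == c)))
            ((K.dropWhile (fun c => decide (c < x.1))).flatMap (fun c => qs.filter (fun p => p.1 == c)))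
            ?_ ?_]
      · rw [flatMap_filter_append_of_ne _ qs x
              (fun c hc h => absurd (h ▸ hAlt c hc) (lt_irrefl _))]
        rw [flatMap_filter_append_of_ne _ qs x
              (fun c hc h => absurd (h ▸ hCgt c hc) (lt_irrefl _))]
        rw [List.filter_append, filter_eq_nil_of_not_mem hnotq]
        simp
      · intro y hy
        have hlt : y.1 < x.1 := hAlt _ (fst_mem_of_mem_flatMap hy)
        simp only [decide_eq_false_iff_not]
        exact fun h => absurd (lt_trans h hlt) (lt_irrefl _)
      · intro y hy
        have hgt : x.1 < y.1 := hCgt _ (fst_mem_of_mem_flatMap hy)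
        simpa using hgt

-- A's loop pairs plus the wraparound pair, the common pair list of both sides
def pvPairsA (s : String) : List (Char × Char) :=
  (PySem.List.pyRange ((PySem.List.len (['{'] ++ s.toList ++ ['}'])) - 1) 0 (-1)).map
    (fun i => (PySem.List.pyGetD (['{'] ++ s.toList ++ ['}']) i ' ',
               PySem.List.pyGetD (['{'] ++ s.toList ++ ['}']) (i - 1) ' ')) ++ [('{', '}')]

theorem len_wrap (s : String) :
    PySem.List.len (['{'] ++ s.toList ++ ['}']) = (s.toList.length : Int) + 2 := by
  simp [PySem.List.len_eq]
  ring

theorem getD_wrap_zero (s : String) :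
    PySem.List.pyGetD (['{'] ++ s.toList ++ ['}']) 0 ' ' = '{' := by
  rw [PySem.List.pyGetD_of_nonneg _ _ (by omega)]
  simp

theorem getD_wrap_last (s : String) :
    PySem.List.pyGetD (['{'] ++ s.toList ++ ['}']) ((s.toList.length : Int) + 1) ' ' = '}' := by
  rw [PySem.List.pyGetD_of_nonneg _ _ (by omega)]
  have ht : ((s.toList.length : Int) + 1).toNat = s.toList.length + 1 := by omega
  rw [ht, List.getD_eq_getElem?_getD]
  rw [show ['{'] ++ s.toList ++ ['}'] = ('{' :: s.toList) ++ ['}'] from by simp]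
  rw [show s.toList.length + 1 = ('{' :: s.toList).length from by simp]
  rw [List.getElem?_concat_length]
  rfl

-- B's pair list equals A's loop pairs followed by the wraparound pair ('{', '}')
theorem pairsB_decomp (s : String) :
    (PySem.List.pyRange ((PySem.List.len (['{'] ++ s.toList ++ ['}'])) - 1) (-1) (-1)).map
      (fun i => (PySem.List.pyGetD (['{'] ++ s.toList ++ ['}']) i ' ',
                 PySem.List.pyGetD (['{'] ++ s.toList ++ ['}'])
                   (PySem.Int.mod (i - 1) (PySem.List.len (['{'] ++ s.toList ++ ['}']))) ' ')) =
    pvPairsA s := by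
  unfold pvPairsA
  rw [len_wrap]
  have hsplit : PySem.List.pyRange ((s.toList.length : Int) + 2 - 1) (-1) (-1)
      = PySem.List.pyRange ((s.toList.length : Int) + 2 - 1) 0 (-1) ++ [0] := by
    rw [PySem.List.pyRange_neg_one, PySem.List.pyRange_neg_one]
    have h1 : (((s.toList.length : Int) + 2 - 1) - (-1)).toNat = s.toList.length + 2 := by omega
    have h2 : (((s.toList.length : Int) + 2 - 1) - 0).toNat = s.toList.length + 1 := by omega
    rw [h1, h2, List.range_succ, List.map_append]
    simp only [List.map_cons, List.map_nil, List.append_cancel_left_eq, List.cons.injEq, and_true]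
    push_cast
    ring
  rw [hsplit, List.map_append]
  congr 1
  · apply List.map_congr_left
    intro i hi
    obtain ⟨h0, h1⟩ := PySem.List.mem_pyRange_neg_one.1 hi
    have hmod : PySem.Int.mod (i - 1) ((s.toList.length : Int) + 2) = i - 1 := by
      rw [PySem.Int.mod_eq_emod_of_pos (by omega)]
      exact Int.emod_eq_of_lt (by omega) (by omega)
    rw [hmod]
  · simp only [List.map_cons, List.map_nil]
    have hmod : PySem.Int.mod (0 - 1) ((s.toList.length : Int) + 2) = (s.toList.length : Int) + 1 := by
      rw [PySem.Int.mod_eq_emod_of_pos (by omega)]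
      have h1 : ((0 - 1 : Int) + ((s.toList.length : Int) + 2) * 1) % ((s.toList.length : Int) + 2)
          = (0 - 1 : Int) % ((s.toList.length : Int) + 2) := Int.add_mul_emod_self_left _ _ _
      rw [← h1, show (0 - 1 : Int) + ((s.toList.length : Int) + 2) * 1 = (s.toList.length : Int) + 1 from by ring]
      exact Int.emod_eq_of_lt (by omega) (by omega)
    rw [hmod, getD_wrap_zero, getD_wrap_last]

-- A's result list, via the dict grouping lemmas
theorem bwt_encode_eq (s : String) :
    bwt_encode s = String.mk
      ((PySem.List.sorted (PySem.Set.ofList ((pvPairsA s).map Prod.fst)) (fun k => k) false).flatMap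
        (fun c => ((pvPairsA s).filter (fun p => p.1 == c)).map (fun p => p.2))) := by
  simp only [bwt_encode, bwtStepA_eq_modify]
  have hmap : ∀ (R : List Int) (d : PySem.Dict Char (List Char)),
      R.foldl (fun d i => d.modify (PySem.List.pyGetD (['{'] ++ s.toList ++ ['}']) i ' ') []
                 (fun old => old ++ [PySem.List.pyGetD (['{'] ++ s.toList ++ ['}']) (i - 1) ' '])) d
      = (R.map (fun i => (PySem.List.pyGetD (['{'] ++ s.toList ++ ['}']) i ' ',
                          PySem.List.pyGetD (['{'] ++ s.toList ++ ['}']) (i - 1) ' '))).foldl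
          (fun d p => d.modify p.1 [] (fun old => old ++ [p.2])) d := by
    intro R d
    rw [List.foldl_map]
  rw [hmap, getD_wrap_zero]
  have hlast : ∀ (d : PySem.Dict Char (List Char)),
      d.modify '{' [] (fun old => old ++ ['}'])
      = List.foldl (fun d p => d.modify p.1 [] (fun old => old ++ [p.2])) d [('{', '}')] := by
    intro d
    rfl
  rw [hlast, ← List.foldl_append]
  set Q : List (Char × Char) := pvPairsA s with hQ
  have hfoldQ : (PySem.List.pyRange (PySem.List.len (['{'] ++ s.toList ++ ['}']) - 1) 0 (-1)).map
        (fun i => (PySem.List.pyGetD (['{'] ++ s.toList ++ ['}']) i ' ',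
                   PySem.List.pyGetD (['{'] ++ s.toList ++ ['}']) (i - 1) ' ')) ++ [('{', '}')] = Q := by
    rw [hQ]
    rfl
  rw [hfoldQ]
  have hkeys : (Q.foldl (fun d p => d.modify p.1 [] (fun old => old ++ [p.2])) PySem.Dict.empty).keys
      = PySem.Set.ofList (Q.map Prod.fst) := by
    have h := PySem.Dict.keys_foldl_modify_key (κ := Char) (ν := List Char) Q Prod.fst []
      (fun _ p => fun old => old ++ [p.2]) PySem.Dict.empty
    simp only [PySem.Dict.keys_empty] at h
    rw [h]
    rw [PySem.Set.ofList_eq_foldl]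
    rfl
  have hgetD : ∀ c, (Q.foldl (fun d p => d.modify p.1 [] (fun old => old ++ [p.2]))
        PySem.Dict.empty).getD c []
      = (Q.filter (fun p => p.1 == c)).map (fun p => p.2) := by
    intro c
    have h := PySem.Dict.getD_foldl_modify_append Q PySem.Dict.empty c
    simpa [PySem.Dict.getD_empty] using h
  rw [hkeys]
  have hfun : (fun k => (Q.foldl (fun d p => d.modify p.1 [] (fun old => old ++ [p.2]))
        PySem.Dict.empty).getD k [])
      = fun k => (Q.filter (fun p => p.1 == k)).map (fun p => p.2) := funext hgetD
  rw [hfun]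
  congr 1

-- ===== VERDICT (by name: the statement is the Claim_ definition above) =====
theorem bwt_encode_spec : Claim_equal_bwt_encode := by
  intro s _
  unfold Spec_bwt_encode
  rw [bwt_encode_eq]
  simp only [bwt_encode_alt]
  rw [pairsB_decomp, sorted_fst_eq_flatMap, List.map_flatMap]
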